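-- pv_equiv track=rewrite | github.com/devang-vala/NLP-Lab | Assignment_10/viterbi.py | train_counts
-- ===== SOURCE A (Python) =====
-- def train_counts(train):
--     START, END = "<S>", "</S>"
--     E = {}   # E[tag][word]
--     T = {}   # T[prev][next]
--     C = {}   # tag counts
--     V = set()
--
--     for sent in train:
--         prev = START
--         for w, t in sent:
--             E.setdefault(t, {})
--             E[t][w] = E[t].get(w, 0) + 1
--
--             T.setdefault(prev, {})
--             T[prev][t] = T[prev].get(t, 0) + 1
--
--             C[t] = C.get(t, 0) + 1
--             prev = t
--             V.add(w)
--
--         T.setdefault(prev, {})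
--         T[prev][END] = T[prev].get(END, 0) + 1
--
--     return E, T, C, V
-- ===== SOURCE B (Python) =====
-- def train_counts(train):
--     START, END = "<S>", "</S>"
--     E = {}   # E[tag][word]
--     T = {}   # T[prev][next]
--     C = {}   # tag counts
--     V = set()
--
--     for sent in train:
--         words = [w for w, _ in sent]
--         tags = [START] + [t for _, t in sent] + [END]
--
--         for t, w in zip(tags[1:], words):
--             E.setdefault(t, {})
--             E[t][w] = E[t].get(w, 0) + 1
--
--         for p, n in zip(tags, tags[1:]):
--             T.setdefault(p, {})
--             T[p][n] = T[p].get(n, 0) + 1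
--
--         for t in tags[1:-1]:
--             C[t] = C.get(t, 0) + 1
--
--         V.update(words)
--
--     return E, T, C, V
-- ===== Notes on version B (the rewrite author's own statement) =====
-- stated objective: alternative
-- what changed: B replaces A's single interleaved loop with prev-state threading by a per-sentence collect-then-accumulate decomposition: it builds the padded tag list [START,t1,...,tn,END] and the word list, derives emission pairs as zip(tags[1:], words) and transition pairs (including the END transition) as zip(tags, tags[1:]), and accumulates E, T, C, V in four independent passes.
import Mathlib
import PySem

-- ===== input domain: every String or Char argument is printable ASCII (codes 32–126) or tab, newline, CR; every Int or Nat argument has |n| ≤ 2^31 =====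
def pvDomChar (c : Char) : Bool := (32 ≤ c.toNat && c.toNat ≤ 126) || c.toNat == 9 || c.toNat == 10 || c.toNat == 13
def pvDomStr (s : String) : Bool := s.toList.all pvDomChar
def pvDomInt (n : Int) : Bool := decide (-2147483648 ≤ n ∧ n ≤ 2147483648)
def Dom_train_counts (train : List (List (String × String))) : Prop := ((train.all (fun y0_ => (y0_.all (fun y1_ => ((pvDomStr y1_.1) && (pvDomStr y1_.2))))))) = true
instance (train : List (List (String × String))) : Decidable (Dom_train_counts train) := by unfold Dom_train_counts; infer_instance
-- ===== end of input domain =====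

-- B replaces A's interleaved prev-threading loop by per-sentence padded-tag zips and four independent accumulation passes; objective: alternative decomposition (same cost).

abbrev DDict := PySem.Dict String (PySem.Dict String Int)
abbrev CDict := PySem.Dict String Int

-- ===== PORT A =====
-- the body of A's inner loop: E-, T-, C-updates, prev := t, V.add(w)
def aInner (s : DDict × DDict × CDict × String × PySem.Set String) (p : String × String) :
    DDict × DDict × CDict × String × PySem.Set String :=
  match s, p with
  | (E, T, C, prev, V), (w, t) =>
    let E1 := E.setdefault t PySem.Dict.empty
    let Ei := E1.getD t PySem.Dict.empty
    let E2 := E1.insert t (Ei.insert w (Ei.getD w 0 + 1))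
    let T1 := T.setdefault prev PySem.Dict.empty
    let Ti := T1.getD prev PySem.Dict.empty
    let T2 := T1.insert prev (Ti.insert t (Ti.getD t 0 + 1))
    let C2 := C.insert t (C.getD t 0 + 1)
    (E2, T2, C2, t, PySem.Set.add V w)

-- A's body of 'for sent in train': prev := START, inner loop, then the END transition
def aSent (acc : DDict × DDict × CDict × PySem.Set String) (sent : List (String × String)) :
    DDict × DDict × CDict × PySem.Set String :=
  match acc with
  | (E, T, C, V) =>
    match sent.foldl aInner (E, T, C, "<S>", V) with
    | (E', T', C', prev, V') =>
      let T1 := T'.setdefault prev PySem.Dict.empty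
      let Ti := T1.getD prev PySem.Dict.empty
      (E', T1.insert prev (Ti.insert "</S>" (Ti.getD "</S>" 0 + 1)), C', V')

def train_counts (train : List (List (String × String))) :
    (List (String × List (String × Int))) × (List (String × List (String × Int))) × (List (String × Int)) × List String :=
  match train.foldl aSent (PySem.Dict.empty, PySem.Dict.empty, PySem.Dict.empty, PySem.Set.empty) with
  | (E, T, C, V) =>
    (E.items.map (fun p => (p.1, p.2.items)), T.items.map (fun p => (p.1, p.2.items)), C.items, V)

-- ===== PORT B =====
-- 'E.setdefault(t, {}); E[t][w] = E[t].get(w, 0) + 1' on an emission pair p = (t, w)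
def eStep (E : DDict) (p : String × String) : DDict :=
  let E1 := E.setdefault p.1 PySem.Dict.empty
  let Ei := E1.getD p.1 PySem.Dict.empty
  E1.insert p.1 (Ei.insert p.2 (Ei.getD p.2 0 + 1))

-- 'T.setdefault(p, {}); T[p][n] = T[p].get(n, 0) + 1' on a transition pair q = (p, n)
def tStep (T : DDict) (q : String × String) : DDict :=
  let T1 := T.setdefault q.1 PySem.Dict.empty
  let Ti := T1.getD q.1 PySem.Dict.empty
  T1.insert q.1 (Ti.insert q.2 (Ti.getD q.2 0 + 1))

-- 'C[t] = C.get(t, 0) + 1'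
def cStep (C : CDict) (t : String) : CDict := C.insert t (C.getD t 0 + 1)

-- B's body of 'for sent in train': words, padded tags, then four independent passes
def bSent (acc : DDict × DDict × CDict × PySem.Set String) (sent : List (String × String)) :
    DDict × DDict × CDict × PySem.Set String :=
  match acc with
  | (E, T, C, V) =>
    let words := sent.map (fun p => p.1)
    let tags := ["<S>"] ++ sent.map (fun p => p.2) ++ ["</S>"]
    let E' := ((PySem.List.slice tags (some 1) none).zip words).foldl eStep E
    let T' := (tags.zip (PySem.List.slice tags (some 1) none)).foldl tStep T
    let C' := (PySem.List.slice tags (some 1) (some (-1))).foldl cStep C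
    let V' := PySem.Set.update V words
    (E', T', C', V')

def train_counts_alt (train : List (List (String × String))) :
    (List (String × List (String × Int))) × (List (String × List (String × Int))) × (List (String × Int)) × List String :=
  match train.foldl bSent (PySem.Dict.empty, PySem.Dict.empty, PySem.Dict.empty, PySem.Set.empty) with
  | (E, T, C, V) =>
    (E.items.map (fun p => (p.1, p.2.items)), T.items.map (fun p => (p.1, p.2.items)), C.items, V)

-- ===== PRECONDITION & SPEC =====
def Spec_train_counts (train : List (List (String × String))) (out : (List (String × List (String × Int))) × (List (String × List (String × Int))) × (List (String × Int)) × List String) : Prop := out = train_counts_alt train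
instance (train : List (List (String × String))) (out : (List (String × List (String × Int))) × (List (String × List (String × Int))) × (List (String × Int)) × List String) : Decidable (Spec_train_counts train out) := by unfold Spec_train_counts; infer_instance

-- ===== CLAIM (what is proved, stated in full; the proofs are below) =====
def Claim_equal_train_counts : Prop := ∀ (train : List (List (String × String))), Dom_train_counts train → Spec_train_counts train (train_counts train)

-- ===== LEMMAS AND PROOFS =====

-- A's interleaved inner fold splits into four independent folds (plus the final prev)
theorem fold_split (sent : List (String × String)) (E T : DDict) (C : CDict) (prev : String) (V : PySem.Set String) :
    sent.foldl aInner (E, T, C, prev, V) =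
      ((sent.map (fun p => (p.2, p.1))).foldl eStep E,
       ((prev :: sent.map (fun p => p.2)).zip (sent.map (fun p => p.2))).foldl tStep T,
       (sent.map (fun p => p.2)).foldl cStep C,
       sent.foldl (fun _ p => p.2) prev,
       (sent.map (fun p => p.1)).foldl PySem.Set.add V) := by
  induction sent generalizing E T C prev V with
  | nil => simp
  | cons hd tl ih =>
    obtain ⟨w, t⟩ := hd
    simp only [List.foldl_cons, List.map_cons, List.zip_cons_cons]
    rw [ih]
    rfl

theorem zipE (sent : List (String × String)) (e : String) :
    (sent.map (fun p => p.2) ++ [e]).zip (sent.map (fun p => p.1)) = sent.map (fun p => (p.2, p.1)) := by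
  induction sent with
  | nil => simp
  | cons hd tl ih => simp [ih]

theorem zipT (ts : List String) (p e : String) :
    (p :: (ts ++ [e])).zip (ts ++ [e]) =
      ((p :: ts).zip ts) ++ [(ts.foldl (fun _ t => t) p, e)] := by
  induction ts generalizing p with
  | nil => simp
  | cons hd tl ih => simp [ih hd]

theorem slice_one_neg_one (x e : String) (l : List String) :
    PySem.List.slice (x :: (l ++ [e])) (some 1) (some (-1)) = l := by
  simp [PySem.List.slice, PySem.List.clampIdx]
  rw [if_neg (by omega)]
  simp

theorem sent_eq (acc : DDict × DDict × CDict × PySem.Set String) (sent : List (String × String)) :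
    aSent acc sent = bSent acc sent := by
  obtain ⟨E, T, C, V⟩ := acc
  simp only [aSent, bSent, fold_split, List.cons_append, List.nil_append, PySem.List.slice_from_one,
    List.tail_cons, slice_one_neg_one, zipE, zipT, List.foldl_append, List.foldl_cons,
    List.foldl_nil, List.foldl_map, PySem.Set.update]
  rfl

-- ===== VERDICT (by name: the statement is the Claim_ definition above) =====
theorem train_counts_spec : Claim_equal_train_counts := by
  intro train _
  unfold Spec_train_counts train_counts train_counts_alt
  rw [show aSent = bSent from funext₂ sent_eq]
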